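-- pv_equiv track=rewrite | github.com/Johanns123/UGV_Wire_Follower | UGV_ROS/scripts/Create_map_score.py | determine_map_size
-- ===== SOURCE A (Python) =====
-- def determine_map_size(objects):
--     """
--     Determina o tamanho necessário do mapa para incluir todos os objetos, centralizando (0,0).
--
--     Args:
--         objects (list): Lista de coordenadas (x, y) dos objetos.
--
--     Returns:
--         int: Tamanho do mapa (dimensão da matriz quadrada).
--     """
--     if not objects:
--         return 1  # Caso não haja objetos, retorna o tamanho mínimo
--
--     min_x = min([x for x, y in objects])
--     max_x = max([x for x, y in objects])
--     min_y = min([y for x, y in objects])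
--     max_y = max([y for x, y in objects])
--
--     # Calcula a maior distância para determinar o tamanho do mapa
--     map_size = max(abs(min_x), abs(max_x), abs(min_y), abs(max_y)) * 2 + 1
--
--     return map_size
-- ===== SOURCE B (Python) =====
-- def determine_map_size(objects):
--     if not objects:
--         return 1
--     m = 0
--     for x, y in objects:
--         m = max(m, abs(x), abs(y))
--     return m * 2 + 1
-- ===== Notes on version B (the rewrite author's own statement) =====
-- stated objective: simpler
-- what changed: Replaces four per-axis comprehension scans plus per-axis min/max extrema with one running-maximum loop over the absolute values of both components, using max(|min v|,|max v|) = max |v|.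
import Mathlib
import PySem

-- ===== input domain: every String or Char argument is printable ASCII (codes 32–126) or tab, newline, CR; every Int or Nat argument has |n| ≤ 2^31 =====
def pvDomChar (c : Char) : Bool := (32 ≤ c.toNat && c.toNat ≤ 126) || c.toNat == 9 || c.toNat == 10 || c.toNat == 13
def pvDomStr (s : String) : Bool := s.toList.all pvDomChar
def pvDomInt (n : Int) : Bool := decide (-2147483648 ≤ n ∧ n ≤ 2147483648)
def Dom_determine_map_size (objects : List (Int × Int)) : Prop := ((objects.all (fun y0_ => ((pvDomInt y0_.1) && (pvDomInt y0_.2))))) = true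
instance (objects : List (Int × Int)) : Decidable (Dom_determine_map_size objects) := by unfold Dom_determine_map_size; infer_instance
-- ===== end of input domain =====

-- B replaces A's four per-axis comprehension scans and per-axis extrema with one
-- running-maximum loop over absolute values of both components (simpler decomposition).


-- ===== PORT A =====
def determine_map_size (objects : List (Int × Int)) : Int :=
  if objects = [] then 1
  else
    let min_x := (PySem.List.min? (objects.map (fun p => p.1)) (fun v => v)).getD 0
    let max_x := (PySem.List.max? (objects.map (fun p => p.1)) (fun v => v)).getD 0
    let min_y := (PySem.List.min? (objects.map (fun p => p.2)) (fun v => v)).getD 0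
    let max_y := (PySem.List.max? (objects.map (fun p => p.2)) (fun v => v)).getD 0
    max (max (max |min_x| |max_x|) |min_y|) |max_y| * 2 + 1

-- ===== PORT B =====
def determine_map_size_alt (objects : List (Int × Int)) : Int :=
  match objects with
  | [] => 1
  | _ :: _ =>
    (objects.foldl (fun m p => max (max m |p.1|) |p.2|) 0) * 2 + 1

-- ===== PRECONDITION & SPEC =====
def Spec_determine_map_size (objects : List (Int × Int)) (out : Int) : Prop := out = determine_map_size_alt objects
instance (objects : List (Int × Int)) (out : Int) : Decidable (Spec_determine_map_size objects out) := by unfold Spec_determine_map_size; infer_instance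

-- ===== CLAIM (what is proved, stated in full; the proofs are below) =====
def Claim_equal_determine_map_size : Prop := ∀ (objects : List (Int × Int)), Dom_determine_map_size objects → Spec_determine_map_size objects (determine_map_size objects)

-- ===== LEMMAS AND PROOFS =====

-- max(|min a v|, |max b v|) = max(|a|,|b|,|v|)   whenever a ≤ b
theorem pv_key (a b v : Int) (h : a ≤ b) :
    max |min a v| |max b v| = max (max |a| |b|) |v| := by
  simp only [min_def, max_def, Int.abs_eq_natAbs]
  split_ifs <;> omega

-- one axis: |running min| ⊔ |running max| = running abs-max
theorem pv_axis (l : List Int) : ∀ (a b : Int), a ≤ b →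
    max |List.foldl min a l| |List.foldl max b l|
      = List.foldl (fun m v => max m |v|) (max |a| |b|) l := by
  induction l with
  | nil => intro a b _; simp
  | cons v t ih =>
    intro a b h
    simp only [List.foldl_cons]
    rw [ih (min a v) (max b v) (le_trans (min_le_left a v) (le_trans h (le_max_left b v))),
        pv_key a b v h]

-- combine the two axes into one fold over the pairs
theorem pv_pair (t : List (Int × Int)) : ∀ (s1 s2 : Int),
    max (List.foldl (fun m v => max m |v|) s1 (t.map Prod.fst))
        (List.foldl (fun m v => max m |v|) s2 (t.map Prod.snd))
      = List.foldl (fun m (p : Int × Int) => max (max m |p.1|) |p.2|) (max s1 s2) t := by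
  induction t with
  | nil => intro s1 s2; simp
  | cons p t ih =>
    intro s1 s2
    simp only [List.map_cons, List.foldl_cons]
    rw [ih, ← max_assoc, max_right_comm s1 |p.1| s2]

-- ===== VERDICT (by name: the statement is the Claim_ definition above) =====
theorem determine_map_size_spec : Claim_equal_determine_map_size := by
  intro objects _
  unfold Spec_determine_map_size determine_map_size determine_map_size_alt
  cases objects with
  | nil => simp
  | cons p t =>
    simp only [if_neg (List.cons_ne_nil p t), List.map_cons,
      PySem.List.min?_id_cons, PySem.List.max?_id_cons, Option.getD_some]
    have hx := pv_axis (t.map Prod.fst) p.1 p.1 le_rfl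
    have hy := pv_axis (t.map Prod.snd) p.2 p.2 le_rfl
    simp only [max_self] at hx hy
    rw [max_assoc, hx, hy, pv_pair, List.foldl_cons]
    have h0 : max (max (0 : Int) |p.1|) |p.2| = max |p.1| |p.2| := by
      rw [max_eq_right (abs_nonneg p.1)]
    rw [h0]
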